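-- pv_equiv track=rewrite | github.com/taiduydinh/pypatternminer | pypatternminer/apriori.py | sameAs
-- ===== SOURCE A (Python) =====
-- def sameAs(itemset1, itemsets2, posRemoved):
--     j = 0
--     for i in range(len(itemset1)):
--         if j == posRemoved:
--             j += 1
--         if itemset1[i] == itemsets2[j]:
--             j += 1
--         elif itemset1[i] > itemsets2[j]:
--             return 1
--         else:
--             return -1
--     return 0
-- ===== SOURCE B (Python) =====
-- def sameAs(itemset1, itemsets2, posRemoved):
--     filtered = [x for idx, x in enumerate(itemsets2) if idx != posRemoved]
--     for i in range(len(itemset1)):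
--         if itemset1[i] == filtered[i]:
--             continue
--         if itemset1[i] > filtered[i]:
--             return 1
--         return -1
--     return 0
-- ===== Notes on version B (the rewrite author's own statement) =====
-- stated objective: simpler
-- what changed: Splits A's single interleaved pass with a running second index j and a mid-loop skip branch into two phases: build the filtered list (itemsets2 with position posRemoved dropped by enumerate-filtering) and then a plain lexicographic element-by-element comparison.
import Mathlib
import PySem

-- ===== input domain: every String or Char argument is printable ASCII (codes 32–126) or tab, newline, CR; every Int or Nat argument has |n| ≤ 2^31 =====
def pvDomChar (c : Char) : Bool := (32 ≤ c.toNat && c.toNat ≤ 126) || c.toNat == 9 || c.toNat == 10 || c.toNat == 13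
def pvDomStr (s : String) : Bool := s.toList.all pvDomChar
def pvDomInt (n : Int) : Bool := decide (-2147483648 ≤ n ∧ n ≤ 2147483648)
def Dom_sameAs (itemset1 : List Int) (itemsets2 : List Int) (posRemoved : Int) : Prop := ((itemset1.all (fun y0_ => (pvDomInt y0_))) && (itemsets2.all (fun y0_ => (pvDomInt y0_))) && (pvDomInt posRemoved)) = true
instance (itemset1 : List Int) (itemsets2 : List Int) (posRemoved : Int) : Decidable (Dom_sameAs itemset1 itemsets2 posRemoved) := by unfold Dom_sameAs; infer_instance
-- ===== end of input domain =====

-- B splits A's single interleaved pass (index j with a mid-loop skip branch) into two phases: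
-- build the filtered list (itemsets2 without position posRemoved) and then a plain
-- lexicographic comparison; objective: simpler.

-- ===== PORT A =====
-- Loop 'for i in range(len(itemset1))' ported as structural recursion over itemset1
-- (same elements in the same order), carrying the Python variable j : Int.
-- The 'none' branch is Python's IndexError on itemsets2[j]; excluded by Pre_sameAs.
def sameAsGoA (itemsets2 : List Int) (posRemoved : Int) : List Int → Int → Int
  | [], _ => 0
  | x :: xs, j =>
    let j' := if j = posRemoved then j + 1 else j
    match PySem.List.pyGet? itemsets2 j' with
    | none => 0
    | some y =>
      if x = y then sameAsGoA itemsets2 posRemoved xs (j' + 1)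
      else if x > y then 1 else -1

def sameAs (itemset1 : List Int) (itemsets2 : List Int) (posRemoved : Int) : Int :=
  sameAsGoA itemsets2 posRemoved itemset1 0

-- ===== PORT B =====
-- The index loop 'for i in range(len(itemset1))' over itemset1[i] / filtered[i] is
-- ported as parallel recursion; the '[]' branch for a live x is Python's IndexError
-- on filtered[i], excluded by Pre_sameAs.
def sameAsLex : List Int → List Int → Int
  | [], _ => 0
  | _ :: _, [] => 0
  | x :: xs, y :: ys =>
    if x = y then sameAsLex xs ys
    else if x > y then 1 else -1

def sameAs_alt (itemset1 : List Int) (itemsets2 : List Int) (posRemoved : Int) : Int :=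
  let filtered := ((PySem.List.enumerate itemsets2 0).filter (fun q => decide (q.1 ≠ posRemoved))).map Prod.snd
  sameAsLex itemset1 filtered

-- ===== PRECONDITION & SPEC =====
-- Pre_ excludes exactly the inputs on which Python A raises IndexError: those where
-- itemsets2-with-posRemoved-dropped is a proper prefix of itemset1 (B raises there too).
def Pre_sameAs (itemset1 : List Int) (itemsets2 : List Int) (posRemoved : Int) : Prop :=
  let filtered := ((PySem.List.enumerate itemsets2 0).filter (fun q => decide (q.1 ≠ posRemoved))).map Prod.snd
  ¬ (filtered.length < itemset1.length ∧ itemset1.take filtered.length = filtered)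
instance (itemset1 : List Int) (itemsets2 : List Int) (posRemoved : Int) : Decidable (Pre_sameAs itemset1 itemsets2 posRemoved) := by unfold Pre_sameAs; infer_instance

def pvWitness_sameAs : List Int × List Int × Int := ([1, 2], [1, 2, 3], 1)

def Spec_sameAs (itemset1 : List Int) (itemsets2 : List Int) (posRemoved : Int) (out : Int) : Prop := out = sameAs_alt itemset1 itemsets2 posRemoved
instance (itemset1 : List Int) (itemsets2 : List Int) (posRemoved : Int) (out : Int) : Decidable (Spec_sameAs itemset1 itemsets2 posRemoved out) := by unfold Spec_sameAs; infer_instance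

-- ===== CLAIM (what is proved, stated in full; the proofs are below) =====
def Claim_equal_sameAs : Prop := ∀ (itemset1 : List Int) (itemsets2 : List Int) (posRemoved : Int), Dom_sameAs itemset1 itemsets2 posRemoved → Pre_sameAs itemset1 itemsets2 posRemoved → Spec_sameAs itemset1 itemsets2 posRemoved (sameAs itemset1 itemsets2 posRemoved)

-- ===== LEMMAS AND PROOFS =====

-- The filtered suffix of itemsets2 seen from absolute index s.
def pvView (posRemoved s : Int) (l : List Int) : List Int :=
  ((PySem.List.enumerate l s).filter (fun q => decide (q.1 ≠ posRemoved))).map Prod.snd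

theorem pvView_nil (p s : Int) : pvView p s [] = [] := by
  simp [pvView, PySem.List.enumerate_nil]

theorem pvView_cons (p s : Int) (x : Int) (l : List Int) :
    pvView p s (x :: l) =
      if s = p then pvView p (s + 1) l else x :: pvView p (s + 1) l := by
  by_cases h : s = p <;> simp [pvView, PySem.List.enumerate_cons, h]

theorem pvView_drop (p : Int) (itemsets2 : List Int) (j : Nat) (hj : j < itemsets2.length) :
    pvView p (j : Int) (itemsets2.drop j) =
      if (j : Int) = p then pvView p ((j : Int) + 1) (itemsets2.drop (j + 1))
      else itemsets2[j] :: pvView p ((j : Int) + 1) (itemsets2.drop (j + 1)) := by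
  rw [List.drop_eq_getElem_cons hj, pvView_cons]

theorem pvGet_some (itemsets2 : List Int) (k : Nat) (hk : k < itemsets2.length) :
    PySem.List.pyGet? itemsets2 (k : Int) = some itemsets2[k] := by
  have := PySem.List.pyGet?_natCast itemsets2 k
  simp [this, List.getElem?_eq_getElem hk]

theorem pvGet_none (itemsets2 : List Int) (k : Nat) (hk : itemsets2.length ≤ k) :
    PySem.List.pyGet? itemsets2 (k : Int) = none := by
  have := PySem.List.pyGet?_natCast itemsets2 k
  simp [this, List.getElem?_eq_none_iff.mpr hk]

theorem pvMain (itemsets2 : List Int) (p : Int) (l : List Int) (j : Nat) :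
    sameAsGoA itemsets2 p l (j : Int) = sameAsLex l (pvView p (j : Int) (itemsets2.drop j)) := by
  induction l generalizing j with
  | nil => simp [sameAsGoA, sameAsLex]
  | cons x xs ih =>
    by_cases hj : (j : Int) = p
    · -- skip branch: j' = j + 1, and (j+1 : Int) ≠ p
      have hne : ((j : Int) + 1) ≠ p := by omega
      have hstep : sameAsGoA itemsets2 p (x :: xs) (j : Int) =
          match PySem.List.pyGet? itemsets2 (((j + 1 : Nat) : Int)) with
          | none => 0
          | some y => if x = y then sameAsGoA itemsets2 p xs (((j + 1 : Nat) : Int) + 1)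
                      else if x > y then 1 else -1 := by
        simp only [sameAsGoA, if_pos hj]
        push_cast
        rfl
      by_cases hlt : j < itemsets2.length
      · rw [pvView_drop p itemsets2 j hlt, if_pos hj, hstep]
        by_cases hlt2 : j + 1 < itemsets2.length
        · have hv := pvView_drop p itemsets2 (j + 1) hlt2
          have hg := pvGet_some itemsets2 (j + 1) hlt2
          push_cast at hv hg ⊢
          rw [if_neg hne] at hv
          rw [hv, hg]
          simp only [sameAsLex]
          split_ifs
          · have := ih (j + 2)
            push_cast at this ⊢
            rw [show (j : Int) + 1 + 1 = ((j : Int) + 2) by ring, this]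
          · rfl
          · rfl
        · rw [(by apply List.drop_eq_nil_of_le; omega : itemsets2.drop (j + 1) = []), pvView_nil,
              pvGet_none itemsets2 (j + 1) (by omega)]
          simp [sameAsLex]
      · rw [(by apply List.drop_eq_nil_of_le; omega : itemsets2.drop j = []), pvView_nil, hstep,
            pvGet_none itemsets2 (j + 1) (by omega)]
        simp [sameAsLex]
    · -- no skip: j' = j
      have hstep : sameAsGoA itemsets2 p (x :: xs) (j : Int) =
          match PySem.List.pyGet? itemsets2 ((j : Nat) : Int) with
          | none => 0
          | some y => if x = y then sameAsGoA itemsets2 p xs (((j : Nat) : Int) + 1)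
                      else if x > y then 1 else -1 := by
        simp only [sameAsGoA, if_neg hj]
      by_cases hlt : j < itemsets2.length
      · rw [pvView_drop p itemsets2 j hlt, if_neg hj, hstep, pvGet_some itemsets2 j hlt]
        simp only [sameAsLex]
        split_ifs
        · have := ih (j + 1)
          push_cast at this ⊢
          rw [this]
        · rfl
        · rfl
      · rw [(by apply List.drop_eq_nil_of_le; omega : itemsets2.drop j = []), pvView_nil, hstep,
            pvGet_none itemsets2 j (by omega)]
        simp [sameAsLex]

-- ===== VERDICT (by name: the statement is the Claim_ definition above) =====
theorem sameAs_spec : Claim_equal_sameAs := by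
  intro itemset1 itemsets2 posRemoved _ _
  show sameAs itemset1 itemsets2 posRemoved = sameAs_alt itemset1 itemsets2 posRemoved
  have h := pvMain itemsets2 posRemoved itemset1 0
  simpa [sameAs, sameAs_alt, pvView] using h
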